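-- pv_equiv track=rewrite | github.com/leftos/vatsim_control_recs | airport_disambiguator/disambiguation_engine.py | _is_unique_in_group_optimized
-- ===== SOURCE A (Python) =====
-- from typing import Dict, List, Optional
--
-- def _is_unique_in_group_optimized(candidate_name: str, current_icao: str,
--                                   all_icaos: List[str], location_words: set,
--                                   all_distinguishing_sets: Dict[str, set]) -> bool:
--     """Optimized uniqueness check using pre-computed data."""
--     # Extract candidate words (excluding location)
--     candidate_words = set(
--         word.lower() for word in candidate_name.split()
--         if word.lower() not in location_words
--     )
--
--     for other_icao in all_icaos:
--         if current_icao == other_icao: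
--             continue
--
--         other_words = all_distinguishing_sets[other_icao]
--
--         # Check if candidate would conflict - if other's words contain all candidate words
--         if candidate_words and candidate_words.issubset(other_words):
--             return False
--
--     return True
-- ===== SOURCE B (Python) =====
-- def _is_unique_in_group_optimized(candidate_name, current_icao,
--                                   all_icaos, location_words,
--                                   all_distinguishing_sets):
--     """Word-major intersection: progressively filter the other ICAOs by each
--     candidate word instead of testing each ICAO's set for subset inclusion."""
--     candidate_words = set(
--         word.lower() for word in candidate_name.split()
--         if word.lower() not in location_words
--     )
--     if not candidate_words:
--         return True
--     surviving = [other for other in all_icaos if other != current_icao]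
--     for word in candidate_words:
--         surviving = [other for other in surviving
--                      if word in all_distinguishing_sets[other]]
--     return not surviving
-- ===== Notes on version B (the rewrite author's own statement) =====
-- stated objective: alternative
-- what changed: B traverses candidate words, progressively filtering the list of other ICAOs down to those whose distinguishing set contains every candidate word (posting-list intersection), instead of A's per-ICAO subset test; the empty candidate set returns True without touching the dict.
-- outside the precondition, e.g. on _is_unique_in_group_optimized('x y', 'K1', ['K2', 'K3'], set(), {'K2': {'y', 'x'}}): A returns False, B raises KeyError
import Mathlib
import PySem

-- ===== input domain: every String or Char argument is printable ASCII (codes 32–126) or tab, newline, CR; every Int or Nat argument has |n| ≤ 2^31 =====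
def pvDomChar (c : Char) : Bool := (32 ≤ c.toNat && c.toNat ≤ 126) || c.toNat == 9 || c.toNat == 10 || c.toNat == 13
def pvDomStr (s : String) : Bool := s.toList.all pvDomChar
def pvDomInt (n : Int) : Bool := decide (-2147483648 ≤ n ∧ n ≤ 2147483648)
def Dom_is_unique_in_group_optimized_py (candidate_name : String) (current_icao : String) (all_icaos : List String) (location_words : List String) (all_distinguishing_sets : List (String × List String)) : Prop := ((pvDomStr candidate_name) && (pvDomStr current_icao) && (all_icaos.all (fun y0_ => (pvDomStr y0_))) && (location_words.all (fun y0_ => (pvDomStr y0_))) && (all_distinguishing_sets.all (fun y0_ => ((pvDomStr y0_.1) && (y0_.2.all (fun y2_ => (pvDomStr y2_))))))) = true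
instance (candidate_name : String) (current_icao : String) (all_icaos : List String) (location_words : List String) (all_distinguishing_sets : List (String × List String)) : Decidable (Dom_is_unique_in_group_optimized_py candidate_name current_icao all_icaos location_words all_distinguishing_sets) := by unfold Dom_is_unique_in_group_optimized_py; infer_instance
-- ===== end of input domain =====

-- B replaces A's per-ICAO subset test by a word-major progressive filter of the other ICAOs
-- (posting-list intersection); same asymptotic cost, different decomposition (objective: alternative).

-- shared by both ports: candidate_words = set(w.lower() for w in candidate_name.split()
--                                             if w.lower() not in location_words)
def pvCandWords (candidate_name : String) (location_words : List String) : PySem.Set String :=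
  PySem.Set.ofList (((PySem.Str.split₀ candidate_name).map (fun w => PySem.Str.lower w)).filter
    (fun w => !(PySem.Set.contains location_words w)))

-- ===== PORT A =====
-- the for-loop over all_icaos; `none` = the KeyError Python raises on a missing key
def pvScanA (cw : PySem.Set String) (cur : String) (d : PySem.Dict String (List String)) :
    List String → Option Bool
  | [] => some true
  | other :: rest =>
    if cur == other then pvScanA cw cur d rest
    else
      match d.get? other with
      | none => none
      | some other_words =>
        if !cw.isEmpty && PySem.Set.issubset cw other_words then some false
        else pvScanA cw cur d rest

def is_unique_in_group_optimized_py (candidate_name : String) (current_icao : String) (all_icaos : List String) (location_words : List String) (all_distinguishing_sets : List (String × List String)) : Bool :=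
  -- `.getD true` only plugs the KeyError case, which Pre_ excludes
  (pvScanA (pvCandWords candidate_name location_words) current_icao
    (PySem.Dict.mk all_distinguishing_sets) all_icaos).getD true

-- ===== PORT B =====
def is_unique_in_group_optimized_py_alt (candidate_name : String) (current_icao : String) (all_icaos : List String) (location_words : List String) (all_distinguishing_sets : List (String × List String)) : Bool :=
  let cw := pvCandWords candidate_name location_words
  if cw.isEmpty then true
  else
    let d := PySem.Dict.mk all_distinguishing_sets
    -- `.getD other []` plugs the KeyError case, which Pre_ excludes
    (cw.foldl
      (fun surviving w => surviving.filter (fun other => (d.getD other []).contains w))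
      (all_icaos.filter (fun other => !(other == current_icao)))).isEmpty

-- ===== PRECONDITION & SPEC =====
-- Pre_ excludes the inputs where some other ICAO is missing from all_distinguishing_sets:
-- there Python A either raises KeyError or (if an earlier ICAO already conflicts) returns
-- False while B's eager per-word filtering raises KeyError.
def Pre_is_unique_in_group_optimized_py (candidate_name : String) (current_icao : String) (all_icaos : List String) (location_words : List String) (all_distinguishing_sets : List (String × List String)) : Prop :=
  ∀ other ∈ all_icaos, other ≠ current_icao →
    ((PySem.Dict.mk all_distinguishing_sets).get? other).isSome = true
instance (candidate_name : String) (current_icao : String) (all_icaos : List String) (location_words : List String) (all_distinguishing_sets : List (String × List String)) : Decidable (Pre_is_unique_in_group_optimized_py candidate_name current_icao all_icaos location_words all_distinguishing_sets) := by unfold Pre_is_unique_in_group_optimized_py; infer_instance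

def pvWitness_is_unique_in_group_optimized_py : String × String × List String × List String × (List (String × List String)) :=
  ("Foo Bar", "KSFO", ["KSFO", "KOAK"], ["bar"], [("KOAK", ["oakland"])])

def Spec_is_unique_in_group_optimized_py (candidate_name : String) (current_icao : String) (all_icaos : List String) (location_words : List String) (all_distinguishing_sets : List (String × List String)) (out : Bool) : Prop := out = is_unique_in_group_optimized_py_alt candidate_name current_icao all_icaos location_words all_distinguishing_sets
instance (candidate_name : String) (current_icao : String) (all_icaos : List String) (location_words : List String) (all_distinguishing_sets : List (String × List String)) (out : Bool) : Decidable (Spec_is_unique_in_group_optimized_py candidate_name current_icao all_icaos location_words all_distinguishing_sets out) := by unfold Spec_is_unique_in_group_optimized_py; infer_instance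

-- ===== CLAIM (what is proved, stated in full; the proofs are below) =====
def Claim_equal_is_unique_in_group_optimized_py : Prop := ∀ (candidate_name : String) (current_icao : String) (all_icaos : List String) (location_words : List String) (all_distinguishing_sets : List (String × List String)), Dom_is_unique_in_group_optimized_py candidate_name current_icao all_icaos location_words all_distinguishing_sets → Pre_is_unique_in_group_optimized_py candidate_name current_icao all_icaos location_words all_distinguishing_sets → Spec_is_unique_in_group_optimized_py candidate_name current_icao all_icaos location_words all_distinguishing_sets (is_unique_in_group_optimized_py candidate_name current_icao all_icaos location_words all_distinguishing_sets)

-- ===== LEMMAS AND PROOFS =====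

theorem pvWitness_ok :
    Dom_is_unique_in_group_optimized_py (pvWitness_is_unique_in_group_optimized_py.1) (pvWitness_is_unique_in_group_optimized_py.2.1) (pvWitness_is_unique_in_group_optimized_py.2.2.1) (pvWitness_is_unique_in_group_optimized_py.2.2.2.1) (pvWitness_is_unique_in_group_optimized_py.2.2.2.2) ∧
    Pre_is_unique_in_group_optimized_py (pvWitness_is_unique_in_group_optimized_py.1) (pvWitness_is_unique_in_group_optimized_py.2.1) (pvWitness_is_unique_in_group_optimized_py.2.2.1) (pvWitness_is_unique_in_group_optimized_py.2.2.2.1) (pvWitness_is_unique_in_group_optimized_py.2.2.2.2) := by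
  decide

theorem pv_all_congr {α : Type} (l : List α) (f g : α → Bool) (h : ∀ x ∈ l, f x = g x) :
    l.all f = l.all g := by
  induction l with
  | nil => rfl
  | cons a l ih =>
    simp only [List.all_cons, h a (by simp), ih (fun x hx => h x (by simp [hx]))]

theorem pv_foldl_filter {α β : Type} (ws : List β) (s : List α) (p : β → α → Bool) :
    ws.foldl (fun s w => s.filter (p w)) s = s.filter (fun o => ws.all (fun w => p w o)) := by
  induction ws generalizing s with
  | nil => simp
  | cons w ws ih =>
    simp only [List.foldl_cons, ih, List.filter_filter, List.all_cons]
    apply List.filter_congr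
    intro a _
    exact Bool.and_comm _ _

theorem pv_isEmpty_filter {α : Type} (l : List α) (p : α → Bool) :
    (l.filter p).isEmpty = l.all (fun x => !p x) := by
  rw [Bool.eq_iff_iff]
  simp [List.isEmpty_iff, List.filter_eq_nil_iff, List.all_eq_true]

theorem pvScanA_eq (cw : PySem.Set String) (cur : String) (d : PySem.Dict String (List String))
    (icaos : List String)
    (h : ∀ o ∈ icaos, o ≠ cur → (d.get? o).isSome = true) :
    pvScanA cw cur d icaos =
      some (icaos.all (fun o =>
        (cur == o) || !(!cw.isEmpty && PySem.Set.issubset cw (d.getD o [])))) := by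
  induction icaos with
  | nil => simp [pvScanA]
  | cons o rest ih =>
    have hrest : ∀ x ∈ rest, x ≠ cur → (d.get? x).isSome = true :=
      fun x hx => h x (List.mem_cons_of_mem _ hx)
    by_cases hc : cur = o
    · subst hc
      simp [pvScanA, ih hrest]
    · have hbeq : (cur == o) = false := by simp [hc]
      have hsome := h o (List.mem_cons_self) (fun e => hc e.symm)
      obtain ⟨ow, how⟩ := Option.isSome_iff_exists.mp hsome
      have hgd : d.getD o [] = ow := by
        rw [PySem.Dict.getD_eq_get?_getD, how]; rfl
      by_cases hcond : (!cw.isEmpty && PySem.Set.issubset cw ow) = true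
      · have hhead : ((cur == o) || !(!cw.isEmpty && PySem.Set.issubset cw (d.getD o []))) = false := by
          rw [hgd]; simp [hbeq, hcond]
        rw [List.all_cons, hhead, Bool.false_and]
        simp [pvScanA, hbeq, how, hcond]
      · have hcond' : (!cw.isEmpty && PySem.Set.issubset cw ow) = false := by
          rwa [Bool.not_eq_true] at hcond
        have hhead : ((cur == o) || !(!cw.isEmpty && PySem.Set.issubset cw (d.getD o []))) = true := by
          rw [hgd]; simp [hcond']
        rw [List.all_cons, hhead, Bool.true_and]
        simp [pvScanA, hbeq, how, hcond', ih hrest]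

-- ===== VERDICT (by name: the statement is the Claim_ definition above) =====
theorem is_unique_in_group_optimized_py_spec : Claim_equal_is_unique_in_group_optimized_py := by
  intro candidate_name current_icao all_icaos location_words all_distinguishing_sets _ hpre
  unfold Spec_is_unique_in_group_optimized_py
  unfold Pre_is_unique_in_group_optimized_py at hpre
  unfold is_unique_in_group_optimized_py is_unique_in_group_optimized_py_alt
  rw [pvScanA_eq _ _ _ _ hpre, Option.getD_some]
  set cw := pvCandWords candidate_name location_words with hcw
  set d := PySem.Dict.mk all_distinguishing_sets with hd
  by_cases hc : cw.isEmpty = true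
  · simp [hc]
  · have hc' : cw.isEmpty = false := by rwa [Bool.not_eq_true] at hc
    rw [if_neg hc]
    simp only [pv_foldl_filter, List.filter_filter, pv_isEmpty_filter]
    apply pv_all_congr
    intro o _
    by_cases ho : o = current_icao
    · subst ho; simp
    · have h1 : (current_icao == o) = false := beq_eq_false_iff_ne.mpr (Ne.symm ho)
      have h2 : (o == current_icao) = false := beq_eq_false_iff_ne.mpr ho
      simp [h1, h2, hc', PySem.Set.issubset, PySem.Set.contains]
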